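-- pv_equiv track=rewrite | github.com/Ewooral/leetcode-and-algoexpert-solutions | python/Two Pointers Technique/amazon_fresh_promo.py | freshPromotion
-- ===== SOURCE A (Python) =====
-- from typing import List
--
-- def freshPromotion(codeList: List, shoppingCart: List):
--     # check for edge cases
--     if codeList is None or len(codeList) == 0:
--         return 1
--     if shoppingCart is None or len(shoppingCart) == 0:
--         return 0
--     clIdx = scIdx = 0
--     while clIdx < len(codeList) and scIdx + len(codeList[clIdx]) <= len(shoppingCart):
--         match: bool = True
--         for itemIdx in range(len(codeList[clIdx])):
--             if not codeList[clIdx][itemIdx] == "anything" and not shoppingCart[itemIdx + scIdx] == codeList[clIdx][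
--                 itemIdx]:
--                 match = False
--                 break
--         if match:
--             scIdx += len(codeList[clIdx])
--             clIdx += 1
--         else:
--             scIdx += 1
--     # return clIdx == len(codeList) if 1 else 0
--     return 1 if clIdx == len(codeList) else 0
-- ===== SOURCE B (Python) =====
-- from typing import List
-- from bisect import bisect_left
--
-- def freshPromotion(codeList: List, shoppingCart: List):
--     if codeList is None or len(codeList) == 0:
--         return 1
--     if shoppingCart is None or len(shoppingCart) == 0:
--         return 0
--     n = len(shoppingCart)
--     # stage 1: for each group, the sorted table of ALL positions where it matches
--     tables = [[j for j in range(n - len(group) + 1)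
--                if all(c == "anything" or shoppingCart[j + k] == c
--                       for k, c in enumerate(group))]
--               for group in codeList]
--     # stage 2: chain the groups through their tables with binary search
--     pos = 0
--     for group, positions in zip(codeList, tables):
--         i = bisect_left(positions, pos)
--         if i == len(positions):
--             return 0
--         pos = positions[i] + len(group)
--     return 1
-- ===== Notes on version B (the rewrite author's own statement) =====
-- stated objective: alternative
-- what changed: Replaced A's single interleaved two-index scan with a staged algorithm: a first pass precomputes, for every code group, the complete sorted table of its match positions in the cart, and a second pass chains the groups by binary search (bisect_left) into those tables.
import Mathlib
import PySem

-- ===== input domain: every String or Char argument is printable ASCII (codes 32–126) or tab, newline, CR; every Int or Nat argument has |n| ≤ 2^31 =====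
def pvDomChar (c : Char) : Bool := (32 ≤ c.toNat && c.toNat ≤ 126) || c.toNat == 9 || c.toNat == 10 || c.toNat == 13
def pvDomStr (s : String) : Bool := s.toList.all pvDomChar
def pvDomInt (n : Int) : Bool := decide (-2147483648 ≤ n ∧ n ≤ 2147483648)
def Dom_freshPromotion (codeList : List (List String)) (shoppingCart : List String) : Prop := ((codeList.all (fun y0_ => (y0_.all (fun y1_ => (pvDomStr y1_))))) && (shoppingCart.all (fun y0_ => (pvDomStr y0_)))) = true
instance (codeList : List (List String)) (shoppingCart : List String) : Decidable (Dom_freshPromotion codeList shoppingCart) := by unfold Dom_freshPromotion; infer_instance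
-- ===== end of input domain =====

-- B replaces A's single interleaved two-index scan by a staged algorithm: precompute the
-- sorted table of all match positions of every group, then chain the groups with bisect_left
-- into those tables; objective: alternative (same cost, different structure).

-- ===== PORT A =====
-- the inner 'for itemIdx in range(len(codeList[clIdx]))' loop with its break
def pvInnerA (cart : List String) : List String → Nat → Bool
  | [], _ => true
  | c :: rest, i =>
    if c ≠ "anything" ∧ cart.getD i "" ≠ c then false
    else pvInnerA cart rest (i + 1)

-- cited by pvLoopA's termination argument (a mismatching group is nonempty)
theorem pvInnerA_nil (cart : List String) (i : Nat) : pvInnerA cart [] i = true := rfl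

-- the 'while clIdx < len(codeList) and scIdx + len(codeList[clIdx]) <= len(shoppingCart)' loop
def pvLoopA (codeList : List (List String)) (cart : List String) (clIdx scIdx : Nat) : Int :=
  if h : clIdx < codeList.length ∧ scIdx + (codeList.getD clIdx []).length ≤ cart.length then
    if hm : pvInnerA cart (codeList.getD clIdx []) scIdx then
      pvLoopA codeList cart (clIdx + 1) (scIdx + (codeList.getD clIdx []).length)
    else
      pvLoopA codeList cart clIdx (scIdx + 1)
  else if clIdx = codeList.length then 1 else 0
termination_by (cart.length - scIdx) + (cart.length - scIdx) + (codeList.length - clIdx)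
decreasing_by
  · exact Nat.add_lt_add_of_le_of_lt
      (Nat.add_le_add
        (Nat.sub_le_sub_left (Nat.le_add_right scIdx _) cart.length)
        (Nat.sub_le_sub_left (Nat.le_add_right scIdx _) cart.length))
      (Nat.sub_succ_lt_self codeList.length clIdx h.1)
  · have hne : codeList.getD clIdx [] ≠ [] := fun he => hm (by rw [he]; exact pvInnerA_nil cart scIdx)
    have hL : 0 < (codeList.getD clIdx []).length := List.length_pos_iff.mpr hne
    have hs : scIdx < cart.length :=
      Nat.lt_of_lt_of_le (Nat.lt_add_of_pos_right hL) h.2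
    have h2 : cart.length - (scIdx + 1) < cart.length - scIdx :=
      Nat.sub_succ_lt_self cart.length scIdx hs
    exact Nat.add_lt_add_right (Nat.add_lt_add h2 h2) _

def freshPromotion (codeList : List (List String)) (shoppingCart : List String) : Int :=
  if codeList.length = 0 then 1
  else if shoppingCart.length = 0 then 0
  else pvLoopA codeList shoppingCart 0 0

-- ===== PORT B =====
-- all(c == "anything" or shoppingCart[j + k] == c for k, c in enumerate(group))
def pvMatchB (group cart : List String) (j : Int) : Bool :=
  (PySem.List.enumerate group 0).all
    (fun kc => kc.2 == "anything" || PySem.List.pyGetD cart (j + kc.1) "" == kc.2)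

-- '[j for j in range(n - len(group) + 1) if <match>]' — the table of all match positions
def pvTableB (cart group : List String) : List Int :=
  (PySem.List.pyRange 0 ((cart.length : Int) - (group.length : Int) + 1) 1).filter
    (fun j => pvMatchB group cart j)

-- the 'for group, positions in zip(codeList, tables)' loop with its early 'return 0'
def pvLoopB (cart : List String) : List (List String × List Int) → Int → Int
  | [], _ => 1
  | (g, positions) :: rest, pos =>
    let i := PySem.List.bisectLeft positions pos
    if i = positions.length then 0
    else pvLoopB cart rest (positions.getD i 0 + (g.length : Int))

def freshPromotion_alt (codeList : List (List String)) (shoppingCart : List String) : Int :=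
  if codeList.length = 0 then 1
  else if shoppingCart.length = 0 then 0
  else pvLoopB shoppingCart (codeList.zip (codeList.map (pvTableB shoppingCart))) 0

-- ===== PRECONDITION & SPEC =====
def Spec_freshPromotion (codeList : List (List String)) (shoppingCart : List String) (out : Int) : Prop := out = freshPromotion_alt codeList shoppingCart
instance (codeList : List (List String)) (shoppingCart : List String) (out : Int) : Decidable (Spec_freshPromotion codeList shoppingCart out) := by unfold Spec_freshPromotion; infer_instance

-- ===== CLAIM (what is proved, stated in full; the proofs are below) =====
def Claim_equal_freshPromotion : Prop := ∀ (codeList : List (List String)) (shoppingCart : List String), Dom_freshPromotion codeList shoppingCart → Spec_freshPromotion codeList shoppingCart (freshPromotion codeList shoppingCart)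

-- ===== LEMMAS AND PROOFS =====

-- proof-side intermediate: 'first match position ≥ pos', the shape A's loop computes
def pvFindF (group cart : List String) (pos : Int) : Option Int :=
  (PySem.List.pyRange pos ((cart.length : Int) - (group.length : Int) + 1) 1).find?
    (fun j => pvMatchB group cart j)

-- proof-side intermediate loop: place each group at its first match position ≥ pos
def pvLoopF (cart : List String) : List (List String) → Int → Int
  | [], _ => 1
  | g :: rest, pos =>
    match pvFindF g cart pos with
    | none => 0
    | some j => pvLoopF cart rest (j + g.length)

-- B's enumerate-based matcher computes A's inner loop (generalized over the enumerate start)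
theorem pvMatchB_aux (cart : List String) (group : List String) :
    ∀ (j s : Nat),
      ((PySem.List.enumerate group (s : Int)).all
        (fun kc => kc.2 == "anything" || PySem.List.pyGetD cart ((j : Int) + kc.1) "" == kc.2))
      = pvInnerA cart group (j + s) := by
  induction group with
  | nil => intro j s; simp [PySem.List.enumerate_nil, pvInnerA]
  | cons c rest ih =>
    intro j s
    rw [PySem.List.enumerate_cons]
    have hcast : ((j : Int) + (s : Int)) = ((j + s : Nat) : Int) := by push_cast; ring
    have htail : ((s : Int) + 1) = ((s + 1 : Nat) : Int) := by push_cast; ring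
    simp only [List.all_cons, hcast, htail, PySem.List.pyGetD_natCast, ih j (s + 1)]
    have : j + (s + 1) = j + s + 1 := by omega
    rw [this]
    by_cases h1 : c = "anything" <;> by_cases h2 : cart[j + s]?.getD "" = c <;>
      simp [pvInnerA, List.getD_eq_getElem?_getD, h1, h2]

theorem pvMatchB_eq (group cart : List String) (j : Nat) :
    pvMatchB group cart (j : Int) = pvInnerA cart group j := by
  have := pvMatchB_aux cart group j 0
  simpa [pvMatchB] using this

-- one step of the find loop when the group still fits at s
theorem pvFindF_step (group cart : List String) (s : Nat)
    (h : s + group.length ≤ cart.length) :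
    pvFindF group cart (s : Int) =
      if pvInnerA cart group s then some (s : Int)
      else pvFindF group cart ((s + 1 : Nat) : Int) := by
  unfold pvFindF
  rw [PySem.List.pyRange_one_cons (by omega), List.find?]
  rw [pvMatchB_eq]
  by_cases hm : pvInnerA cart group s
  · simp [hm]
  · simp only [hm, if_neg, Bool.false_eq_true, not_false_iff]
    have : ((s : Int) + 1) = ((s + 1 : Nat) : Int) := by push_cast; ring
    rw [this]

-- the find loop is empty when the group no longer fits at s
theorem pvFindF_none (group cart : List String) (s : Nat)
    (h : ¬ (s + group.length ≤ cart.length)) :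
    pvFindF group cart (s : Int) = none := by
  unfold pvFindF
  rw [PySem.List.pyRange_one_eq_nil (by omega)]
  rfl

-- A's loop equals the find-based loop on the remaining groups
theorem pvLoopA_eq_pvLoopF (codeList : List (List String)) (cart : List String) :
    ∀ (clIdx scIdx : Nat), clIdx ≤ codeList.length →
      pvLoopA codeList cart clIdx scIdx = pvLoopF cart (codeList.drop clIdx) (scIdx : Int) := by
  intro clIdx scIdx
  induction clIdx, scIdx using pvLoopA.induct codeList cart with
  | case1 clIdx scIdx h hm ih =>
    intro hle
    have hlt : clIdx < codeList.length := h.1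
    have hg : codeList.getD clIdx [] = codeList[clIdx] := List.getD_eq_getElem _ _ hlt
    rw [pvLoopA, dif_pos h, dif_pos hm, ih (by omega),
        List.drop_eq_getElem_cons hlt, pvLoopF]
    rw [pvFindF_step _ _ _ (by rw [← hg]; exact h.2), if_pos (by rw [← hg]; exact hm)]
    rw [hg]
    show pvLoopF cart (List.drop (clIdx + 1) codeList) ((scIdx + codeList[clIdx].length : Nat) : Int)
        = pvLoopF cart (List.drop (clIdx + 1) codeList) ((scIdx : Int) + (codeList[clIdx].length : Int))
    congr 1
  | case2 clIdx scIdx h hm ih =>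
    intro hle
    have hlt : clIdx < codeList.length := h.1
    have hg : codeList.getD clIdx [] = codeList[clIdx] := List.getD_eq_getElem _ _ hlt
    rw [pvLoopA, dif_pos h, dif_neg hm, ih hle]
    conv_rhs => rw [List.drop_eq_getElem_cons hlt, pvLoopF,
        pvFindF_step _ _ _ (by rw [← hg]; exact h.2),
        if_neg (by rw [← hg]; exact hm)]
    rw [List.drop_eq_getElem_cons hlt, pvLoopF]
  | case3 scIdx h =>
    intro _
    rw [pvLoopA, dif_neg h, if_pos rfl, List.drop_length, pvLoopF]
  | case4 clIdx scIdx h hne =>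
    intro hle
    have hlt : clIdx < codeList.length := by omega
    have hg : codeList.getD clIdx [] = codeList[clIdx] := List.getD_eq_getElem _ _ hlt
    have hnf : ¬ (scIdx + codeList[clIdx].length ≤ cart.length) := by
      intro hc; exact h ⟨hlt, by rw [hg]; exact hc⟩
    rw [pvLoopA, dif_neg h, if_neg hne, List.drop_eq_getElem_cons hlt, pvLoopF,
        pvFindF_none _ _ _ hnf]

-- find? (x ≤ ·) on a filtered list whose elements are all ≥ x is find? of the filter predicate
theorem pvFind_le_filter (p : Int → Bool) (x : Int) :
    ∀ (xs : List Int), (∀ y ∈ xs, x ≤ y) →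
      (xs.filter p).find? (fun y => decide (x ≤ y)) = xs.find? p := by
  intro xs
  induction xs with
  | nil => intro _; rfl
  | cons y ys ih =>
    intro hall
    by_cases hp : p y
    · simp [hp, hall y (by simp)]
    · simp only [List.filter_cons, hp, if_neg, Bool.false_eq_true, not_false_iff, List.find?_cons]
      rw [ih (fun z hz => hall z (by simp [hz]))]

-- a bisect_left lookup in a sorted list returns the first element ≥ x
theorem pvBisect_getElem? (xs : List Int) (x : Int)
    (hs : xs.Pairwise (· ≤ ·)) :
    xs[PySem.List.bisectLeft xs x]? = xs.find? (fun y => decide (x ≤ y)) := by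
  obtain ⟨hle, hbefore, hafter⟩ := PySem.List.bisectLeft_spec xs x hs
  set i := PySem.List.bisectLeft xs x with hi
  by_cases hil : i < xs.length
  · rw [List.getElem?_eq_getElem hil]
    symm
    rw [List.find?_eq_some_iff_getElem]
    refine ⟨by simp [hafter i hil (le_refl _)], i, hil, rfl, ?_⟩
    intro j hj
    have := hbefore j (lt_trans hj hil) hj
    simp; omega
  · have hieq : i = xs.length := by omega
    rw [hieq, List.getElem?_eq_none (le_refl _)]
    symm
    rw [List.find?_eq_none]
    intro y hy
    obtain ⟨j, hj, rfl⟩ := List.mem_iff_getElem.mp hy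
    have := hbefore j hj (by omega)
    simp; omega

-- bisect_left into the filtered table of range(0,b) reads off the first match position ≥ x
theorem pvBisect_get_eq_find (p : Int → Bool) (b : Int) (x : Nat) :
    ((PySem.List.pyRange 0 b 1).filter p)[
        PySem.List.bisectLeft ((PySem.List.pyRange 0 b 1).filter p) (x : Int)]?
      = (PySem.List.pyRange (x : Int) b 1).find? p := by
  have hsorted : ((PySem.List.pyRange 0 b 1).filter p).Pairwise (· ≤ ·) :=
    ((PySem.List.pairwise_lt_pyRange_one 0 b).filter _).imp le_of_lt
  rw [pvBisect_getElem? _ _ hsorted]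
  by_cases hxb : (x : Int) ≤ b
  · rw [PySem.List.pyRange_one_append 0 (x : Int) b (by omega) hxb, List.filter_append,
        List.find?_append]
    have h0 : ((PySem.List.pyRange 0 (x : Int) 1).filter p).find?
        (fun y => decide ((x : Int) ≤ y)) = none := by
      rw [List.find?_eq_none]
      intro y hy
      have := ((PySem.List.mem_pyRange_one).mp (List.mem_of_mem_filter hy)).2
      simp; omega
    rw [h0, Option.none_or]
    exact pvFind_le_filter p (x : Int) _
      (fun y hy => ((PySem.List.mem_pyRange_one).mp hy).1)
  · rw [PySem.List.pyRange_one_eq_nil (show b ≤ (x : Int) by omega), List.find?_nil,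
        List.find?_eq_none]
    intro y hy
    have := ((PySem.List.mem_pyRange_one).mp (List.mem_of_mem_filter hy)).2
    simp; omega

-- one step: the bisect lookup into the table is exactly the forward find
theorem pvStep (g cart : List String) (s : Nat) :
    (pvTableB cart g)[PySem.List.bisectLeft (pvTableB cart g) (s : Int)]?
      = pvFindF g cart (s : Int) := by
  unfold pvTableB pvFindF
  exact pvBisect_get_eq_find _ _ s

-- B's staged loop equals the find-based loop
theorem pvLoopB_eq_pvLoopF (cart : List String) :
    ∀ (gs : List (List String)) (s : Nat),
      pvLoopB cart (gs.zip (gs.map (pvTableB cart))) (s : Int) = pvLoopF cart gs (s : Int) := by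
  intro gs
  induction gs with
  | nil => intro s; rfl
  | cons g rest ih =>
    intro s
    rw [List.map_cons, List.zip_cons_cons, pvLoopB, pvLoopF]
    have hstep := pvStep g cart s
    cases hfind : pvFindF g cart (s : Int) with
    | none =>
      rw [hfind] at hstep
      have : PySem.List.bisectLeft (pvTableB cart g) (s : Int) = (pvTableB cart g).length := by
        have := List.getElem?_eq_none_iff.mp hstep
        have hle := (PySem.List.bisectLeft_spec (pvTableB cart g) (s : Int)
          (((PySem.List.pairwise_lt_pyRange_one 0 _).filter _).imp le_of_lt)).1
        omega
      simp [this]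
    | some j =>
      rw [hfind] at hstep
      have hilt : PySem.List.bisectLeft (pvTableB cart g) (s : Int) < (pvTableB cart g).length :=
        List.getElem?_eq_some_iff.mp hstep |>.1
      have hgetD : (pvTableB cart g).getD (PySem.List.bisectLeft (pvTableB cart g) (s : Int)) 0 = j := by
        rw [List.getD_eq_getElem?_getD, hstep]; rfl
      -- j ≥ s ≥ 0, so j + len is a Nat cast
      have hjmem : j ∈ PySem.List.pyRange (s : Int)
          ((cart.length : Int) - (g.length : Int) + 1) 1 := by
        exact List.mem_of_find?_eq_some hfind
      have hjge : (s : Int) ≤ j := ((PySem.List.mem_pyRange_one).mp hjmem).1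
      have hj0 : 0 ≤ j := le_trans (by omega) hjge
      rw [if_neg (Nat.ne_of_lt hilt), hgetD]
      have hcast : j + (g.length : Int) = ((j.toNat + g.length : Nat) : Int) := by
        push_cast; omega
      rw [hcast, ih]
      congr 1
      push_cast; omega

-- ===== VERDICT (by name: the statement is the Claim_ definition above) =====
theorem freshPromotion_spec : Claim_equal_freshPromotion := by
  intro codeList shoppingCart _
  unfold Spec_freshPromotion freshPromotion freshPromotion_alt
  by_cases h1 : codeList.length = 0
  · simp [h1]
  · by_cases h2 : shoppingCart.length = 0
    · simp [h1, h2]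
    · rw [if_neg h1, if_neg h2, if_neg h1, if_neg h2]
      have hA := pvLoopA_eq_pvLoopF codeList shoppingCart 0 0 (by omega)
      have hB := pvLoopB_eq_pvLoopF shoppingCart codeList 0
      simp only [List.drop_zero, Nat.cast_zero] at hA hB
      rw [hA, ← hB]
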